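-- pv_equiv track=rewrite | github.com/joseliitoo32/PROG | 34.py | cuentaYReemplazaVocales
-- ===== SOURCE A (Python) =====
-- def cuentaYReemplazaVocales(texto):
--     vocales = "aeiouAEIOU"
--     cuenta = 0
--     nuevoTexto = ""
--
--     for letra in texto:
--         if letra in vocales:
--             cuenta += 1
--             nuevoTexto += "X"
--         else:
--             nuevoTexto += letra
--
--     return cuenta, nuevoTexto
-- ===== SOURCE B (Python) =====
-- def cuentaYReemplazaVocales(texto):
--     vocales = "aeiouAEIOU"
--     cuenta = sum(1 for c in texto if c in vocales)
--     nuevoTexto = texto.translate(str.maketrans(vocales, "X" * len(vocales)))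
--     return cuenta, nuevoTexto
-- ===== Notes on version B (the rewrite author's own statement) =====
-- stated objective: idiomatic
-- what changed: Replaces the single fused loop with character-by-character string concatenation by two separate passes: a generator-sum for the count and a table-driven str.translate for the replacement.
import Mathlib
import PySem

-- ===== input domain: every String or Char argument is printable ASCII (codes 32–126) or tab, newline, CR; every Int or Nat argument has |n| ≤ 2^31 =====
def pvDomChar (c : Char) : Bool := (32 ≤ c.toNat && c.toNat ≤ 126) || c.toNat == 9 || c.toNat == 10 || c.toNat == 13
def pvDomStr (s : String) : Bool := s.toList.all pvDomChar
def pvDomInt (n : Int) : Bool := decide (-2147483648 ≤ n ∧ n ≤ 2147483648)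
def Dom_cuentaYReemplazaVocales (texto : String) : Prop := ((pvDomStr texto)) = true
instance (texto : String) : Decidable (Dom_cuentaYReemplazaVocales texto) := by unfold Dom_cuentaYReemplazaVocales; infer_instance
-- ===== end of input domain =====

-- B computes the count and the replaced string in two separate passes (aggregation + per-char translation) instead of A's single fused loop with string concatenation; objective: idiomatic.


-- ===== PORT A =====
-- A: one loop over the characters, maintaining (cuenta, nuevoTexto).
def cuentaYReemplazaVocales (texto : String) : Int × String :=
  let vocales := "aeiouAEIOU"
  let r := texto.toList.foldl
    (fun (st : Int × List Char) letra =>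
      if letra ∈ vocales.toList then (st.1 + 1, st.2 ++ ['X'])
      else (st.1, st.2 ++ [letra]))
    (0, [])
  (r.1, String.ofList r.2)

-- ===== PORT B =====
-- B: count by filtering, string by a per-character translation map.
def pvTranslate (c : Char) : Char :=
  if c ∈ "aeiouAEIOU".toList then 'X' else c

def cuentaYReemplazaVocales_alt (texto : String) : Int × String :=
  let cuenta : Int := (texto.toList.filter (fun c => c ∈ "aeiouAEIOU".toList)).length
  let nuevoTexto := String.ofList (texto.toList.map pvTranslate)
  (cuenta, nuevoTexto)

-- ===== PRECONDITION & SPEC =====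
def Spec_cuentaYReemplazaVocales (texto : String) (out : Int × String) : Prop := out = cuentaYReemplazaVocales_alt texto
instance (texto : String) (out : Int × String) : Decidable (Spec_cuentaYReemplazaVocales texto out) := by unfold Spec_cuentaYReemplazaVocales; infer_instance

-- ===== CLAIM (what is proved, stated in full; the proofs are below) =====
def Claim_equal_cuentaYReemplazaVocales : Prop := ∀ (texto : String), Dom_cuentaYReemplazaVocales texto → Spec_cuentaYReemplazaVocales texto (cuentaYReemplazaVocales texto)

-- ===== LEMMAS AND PROOFS =====
-- Loop invariant for A's fold: starting from (c, acc) it ends at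
-- (c + #filtered, acc ++ translated).
theorem pvFold_invariant (l : List Char) (c : Int) (acc : List Char) :
    l.foldl
      (fun (st : Int × List Char) letra =>
        if letra ∈ "aeiouAEIOU".toList then (st.1 + 1, st.2 ++ ['X'])
        else (st.1, st.2 ++ [letra]))
      (c, acc)
    = (c + (l.filter (fun x => x ∈ "aeiouAEIOU".toList)).length, acc ++ l.map pvTranslate) := by
  induction l generalizing c acc with
  | nil => simp
  | cons h t ih =>
    rw [List.foldl_cons]
    by_cases hv : h ∈ "aeiouAEIOU".toList
    · rw [if_pos hv, ih, List.filter_cons_of_pos (by simpa using hv)]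
      have ht : pvTranslate h = 'X' := if_pos hv
      rw [List.map_cons, ht]
      refine Prod.ext ?_ ?_
      · simp only [List.length_cons]
        push_cast
        ring
      · simp
    · rw [if_neg hv, ih, List.filter_cons_of_neg (by simpa using hv)]
      have ht : pvTranslate h = h := if_neg hv
      rw [List.map_cons, ht]
      simp

-- ===== VERDICT (by name: the statement is the Claim_ definition above) =====
theorem cuentaYReemplazaVocales_spec : Claim_equal_cuentaYReemplazaVocales := by
  intro texto _
  show cuentaYReemplazaVocales texto = cuentaYReemplazaVocales_alt texto
  simp only [cuentaYReemplazaVocales, cuentaYReemplazaVocales_alt, pvFold_invariant]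
  simp
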